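-- pv_equiv track=rewrite | github.com/Brenner87/Projects | CodeAbby/knitting/knitting_ui.py | calculate_nums_in_block
-- ===== SOURCE A (Python) =====
-- def calculate_nums_in_block(row_num, rows_in_block, adding_each, results_num=None, starting_from=None):
--     count = 0
--     results = []
--     start_pos = starting_from or 1
--     for i in range(start_pos, row_num + 1):
--         count += 1
--         if adding_each[0] == count:
--             adding_each.append(adding_each.pop(0))
--             count = 0
--             num_in_block = i % rows_in_block or rows_in_block
--             results.append(num_in_block)
--     if results_num and len(results) > results_num:
--         return results[:results_num]
--     return results
-- ===== SOURCE B (Python) =====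
-- def calculate_nums_in_block(row_num, rows_in_block, adding_each, results_num=None, starting_from=None):
--     # Jump directly from trigger row to trigger row (cyclic steps through
--     # adding_each) instead of scanning every row. Return value only: unlike A,
--     # this does not rotate adding_each in place.
--     results = []
--     pos = (starting_from or 1) - 1
--     n = len(adding_each)
--     k = 0
--     while n:
--         step = adding_each[k % n]
--         if step <= 0 or pos + step > row_num:
--             break
--         pos += step
--         results.append(pos % rows_in_block or rows_in_block)
--         k += 1
--     if results_num and len(results) > results_num:
--         return results[:results_num]
--     return results
-- ===== Notes on version B (the rewrite author's own statement) =====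
-- stated objective: alternative
-- what changed: Instead of scanning every row from start_pos to row_num with a counter, B jumps directly from one trigger row to the next by adding the cyclic adding_each step (indexed k % len), doing one loop iteration per recorded row instead of per row; return value only: B does not rotate adding_each in place as A does.
import Mathlib
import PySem

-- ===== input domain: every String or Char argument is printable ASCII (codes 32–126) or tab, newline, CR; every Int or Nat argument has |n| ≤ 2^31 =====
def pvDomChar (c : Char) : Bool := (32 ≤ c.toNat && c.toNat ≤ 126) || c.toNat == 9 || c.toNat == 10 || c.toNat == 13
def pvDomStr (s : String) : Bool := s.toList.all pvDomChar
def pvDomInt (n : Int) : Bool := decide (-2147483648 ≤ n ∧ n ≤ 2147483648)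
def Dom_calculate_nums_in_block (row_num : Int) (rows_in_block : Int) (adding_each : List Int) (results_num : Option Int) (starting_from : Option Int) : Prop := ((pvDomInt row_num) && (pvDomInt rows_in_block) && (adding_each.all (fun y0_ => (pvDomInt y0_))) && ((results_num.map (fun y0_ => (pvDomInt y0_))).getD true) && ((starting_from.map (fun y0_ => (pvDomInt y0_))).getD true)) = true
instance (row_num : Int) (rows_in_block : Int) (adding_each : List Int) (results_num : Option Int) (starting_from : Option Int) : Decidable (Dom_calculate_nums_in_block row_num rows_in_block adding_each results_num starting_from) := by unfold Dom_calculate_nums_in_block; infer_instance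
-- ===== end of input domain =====

-- B replaces A's row-by-row counter scan by direct jumps from one trigger row to the next
-- (adding the cyclic adding_each step each time); the equivalence is about the RETURN value
-- only: A also rotates adding_each in place, B does not.

-- ===== PORT A =====
-- shared helpers of both ports: `starting_from or 1` and `i % rows_in_block or rows_in_block`
def pvStart (starting_from : Option Int) : Int :=
  match starting_from with
  | some s => if s = 0 then 1 else s
  | none => 1

def pvEmit (i rows_in_block : Int) : Int :=
  let m := PySem.Int.mod i rows_in_block
  if m ≠ 0 then m else rows_in_block

-- one iteration of A's for-loop: state = (count, adding_each, results)
def pvAStep (rows_in_block : Int) (s : Int × List Int × List Int) (i : Int) : Int × List Int × List Int :=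
  let c := s.1 + 1
  match s.2.1 with
  | [] => (c, [], s.2.2)       -- adding_each[0] raises in Python here; outside Pre_
  | h :: t => if h = c then (0, t ++ [h], s.2.2 ++ [pvEmit i rows_in_block]) else (c, h :: t, s.2.2)

def pvARun (row_num rows_in_block : Int) (i : Int) (s : Int × List Int × List Int) : Int × List Int × List Int :=
  (PySem.List.pyRange i (row_num + 1) 1).foldl (pvAStep rows_in_block) s

def calculate_nums_in_block (row_num : Int) (rows_in_block : Int) (adding_each : List Int) (results_num : Option Int) (starting_from : Option Int) : List Int :=
  let results := (pvARun row_num rows_in_block (pvStart starting_from) (0, adding_each, [])).2.2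
  match results_num with
  | some r => if r ≠ 0 ∧ r < (results.length : Int) then PySem.List.slice results none (some r) else results
  | none => results

-- ===== PORT B =====
-- B's while loop. pos strictly increases by ≥ 1 per iteration and is bounded by row_num,
-- so fuel = (row_num + 1 - start).toNat iterations make the port exact.
def pvAltLoop (row_num rows_in_block : Int) (adding_each : List Int) : Nat → Int → Nat → List Int → List Int
  | 0, _, _, acc => acc
  | fuel + 1, pos, k, acc =>
    let step := adding_each.getD (k % adding_each.length) 0
    if step ≤ 0 ∨ row_num < pos + step then acc
    else pvAltLoop row_num rows_in_block adding_each fuel (pos + step) (k + 1)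
           (acc ++ [pvEmit (pos + step) rows_in_block])

def calculate_nums_in_block_alt (row_num : Int) (rows_in_block : Int) (adding_each : List Int) (results_num : Option Int) (starting_from : Option Int) : List Int :=
  let start := pvStart starting_from
  let results :=
    if adding_each.isEmpty then []
    else pvAltLoop row_num rows_in_block adding_each (row_num + 1 - start).toNat (start - 1) 0 []
  match results_num with
  | some r => if r ≠ 0 ∧ r < (results.length : Int) then PySem.List.slice results none (some r) else results
  | none => results

-- ===== PRECONDITION & SPEC =====
-- Pre_ excludes exactly the inputs where Python A raises: IndexError (empty adding_each with a
-- nonempty row range) and ZeroDivisionError (rows_in_block = 0 when the first trigger is reached).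
def Pre_calculate_nums_in_block (row_num : Int) (rows_in_block : Int) (adding_each : List Int) (results_num : Option Int) (starting_from : Option Int) : Prop :=
  (adding_each = [] → row_num < pvStart starting_from) ∧
  (rows_in_block = 0 →
    adding_each.head?.getD 0 ≤ 0 ∨ row_num + 1 < pvStart starting_from + adding_each.head?.getD 0)

instance (row_num : Int) (rows_in_block : Int) (adding_each : List Int) (results_num : Option Int) (starting_from : Option Int) : Decidable (Pre_calculate_nums_in_block row_num rows_in_block adding_each results_num starting_from) := by unfold Pre_calculate_nums_in_block; infer_instance

def pvWitness_calculate_nums_in_block : Int × Int × List Int × Option Int × Option Int :=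
  (10, 3, [2, 3], none, none)

def Spec_calculate_nums_in_block (row_num : Int) (rows_in_block : Int) (adding_each : List Int) (results_num : Option Int) (starting_from : Option Int) (out : List Int) : Prop := out = calculate_nums_in_block_alt row_num rows_in_block adding_each results_num starting_from
instance (row_num : Int) (rows_in_block : Int) (adding_each : List Int) (results_num : Option Int) (starting_from : Option Int) (out : List Int) : Decidable (Spec_calculate_nums_in_block row_num rows_in_block adding_each results_num starting_from out) := by unfold Spec_calculate_nums_in_block; infer_instance

-- ===== CLAIM (what is proved, stated in full; the proofs are below) =====
def Claim_equal_calculate_nums_in_block : Prop := ∀ (row_num : Int) (rows_in_block : Int) (adding_each : List Int) (results_num : Option Int) (starting_from : Option Int), Dom_calculate_nums_in_block row_num rows_in_block adding_each results_num starting_from → Pre_calculate_nums_in_block row_num rows_in_block adding_each results_num starting_from → Spec_calculate_nums_in_block row_num rows_in_block adding_each results_num starting_from (calculate_nums_in_block row_num rows_in_block adding_each results_num starting_from)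


-- ===== LEMMAS AND PROOFS =====
-- left rotation of adding_each after k triggers (A rotates the list itself; B indexes by k % n)
def pvRot (k : Nat) (ae : List Int) : List Int :=
  ae.drop (k % ae.length) ++ ae.take (k % ae.length)

lemma pv_mod_succ (k n : Nat) (hn : 0 < n) :
    (k + 1) % n = if k % n + 1 = n then 0 else k % n + 1 := by
  have hlt : k % n < n := Nat.mod_lt _ hn
  have h1 : (k + 1) % n = (k % n + 1) % n := by
    conv_lhs => rw [← Nat.mod_add_div k n]
    rw [Nat.add_right_comm, Nat.add_mul_mod_self_left]
  rcases eq_or_ne (k % n + 1) n with h | h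
  · simp [h, h1]
  · rw [h1, Nat.mod_eq_of_lt (by omega)]
    simp [h]

lemma pvRot_ne_nil (k : Nat) (ae : List Int) (h : ae ≠ []) : pvRot k ae ≠ [] := by
  have hn : 0 < ae.length := List.length_pos_iff.mpr h
  have := Nat.mod_lt k hn
  unfold pvRot
  intro hc
  rcases List.append_eq_nil_iff.mp hc with ⟨h1, -⟩
  have := List.length_drop (l := ae) (i := k % ae.length)
  rw [h1] at this
  simp at this
  omega

lemma pvRot_head (k : Nat) (ae : List Int) (h : ae ≠ []) :
    (pvRot k ae).head? = some (ae.getD (k % ae.length) 0) := by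
  have hn : 0 < ae.length := List.length_pos_iff.mpr h
  have hm : k % ae.length < ae.length := Nat.mod_lt _ hn
  unfold pvRot
  rw [List.head?_append]
  rw [List.head?_drop]
  simp [List.getD, List.getElem?_eq_getElem hm]

lemma pvRot_tail_append (k : Nat) (ae : List Int) (h : ae ≠ []) :
    (pvRot k ae).tail ++ [ae.getD (k % ae.length) 0] = pvRot (k + 1) ae := by
  have hn : 0 < ae.length := List.length_pos_iff.mpr h
  have hm : k % ae.length < ae.length := Nat.mod_lt _ hn
  have hdrop : ae.drop (k % ae.length) ≠ [] := by
    intro hc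
    have := List.length_drop (l := ae) (i := k % ae.length)
    rw [hc] at this; simp at this; omega
  have htail : (pvRot k ae).tail = ae.drop (k % ae.length + 1) ++ ae.take (k % ae.length) := by
    unfold pvRot
    rw [List.tail_append_of_ne_nil hdrop, List.tail_drop]
  have hget : ae.getD (k % ae.length) 0 = ae[k % ae.length]'hm := by
    simp [List.getD, List.getElem?_eq_getElem hm]
  have htake : ae.take (k % ae.length) ++ [ae[k % ae.length]'hm] = ae.take (k % ae.length + 1) := by
    rw [← List.concat_eq_append, List.take_concat_get]
  rw [htail, hget, List.append_assoc, htake]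
  simp only [pvRot, pv_mod_succ k ae.length hn]
  split_ifs with he
  · rw [he]
    simp
  · rfl

-- A's scan, started at row i with count c and current list h :: t, reaches its next trigger
-- (if any) at row i + (h - c) - 1 and continues with the rotated list.
lemma pv_chunk (row_num rows_in_block : Int) :
    ∀ (m : Nat) (i c : Int) (h : Int) (t res : List Int), (row_num + 1 - i).toNat = m →
      (pvARun row_num rows_in_block i (c, h :: t, res)).2.2 =
        if c < h ∧ i + (h - c) ≤ row_num + 1
        then (pvARun row_num rows_in_block (i + (h - c))
               (0, t ++ [h], res ++ [pvEmit (i + (h - c) - 1) rows_in_block])).2.2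
        else res := by
  intro m
  induction m with
  | zero =>
    intro i c h t res hm
    have hi : row_num + 1 ≤ i := by omega
    rw [pvARun, PySem.List.pyRange_one_eq_nil hi]
    simp only [List.foldl_nil]
    rw [if_neg]
    omega
  | succ m ih =>
    intro i c h t res hm
    have hi : i < row_num + 1 := by omega
    rw [pvARun, PySem.List.pyRange_one_cons hi]
    simp only [List.foldl_cons]
    rcases eq_or_ne h (c + 1) with he | he
    · have hstep : pvAStep rows_in_block (c, h :: t, res) i =
        (0, t ++ [h], res ++ [pvEmit i rows_in_block]) := by
        simp [pvAStep, he]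
      rw [hstep]
      rw [if_pos (by omega)]
      have harg : i + (h - c) - 1 = i := by omega
      have harg2 : i + (h - c) = i + 1 := by omega
      rw [harg, harg2, pvARun]
    · have hstep : pvAStep rows_in_block (c, h :: t, res) i = (c + 1, h :: t, res) := by
        simp [pvAStep, he]
      rw [hstep]
      have := ih (i + 1) (c + 1) h t res (by omega)
      rw [pvARun] at this
      rw [this]
      have harg : i + 1 + (h - (c + 1)) = i + (h - c) := by ring
      rw [harg]
      rcases lt_trichotomy c h with hlt | heq | hgt
      · by_cases hb : i + (h - c) ≤ row_num + 1
        · rw [if_pos (by omega), if_pos (by constructor <;> omega)]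
        · rw [if_neg (by omega), if_neg (by omega)]
      · rw [if_neg (by omega), if_neg (by omega)]
      · rw [if_neg (by omega), if_neg (by omega)]

-- A's scan from row pos+1 with count 0 and the k-times-rotated list computes B's jump loop.
lemma pv_main (row_num rows_in_block : Int) (ae : List Int) (hne : ae ≠ []) :
    ∀ (fuel : Nat) (pos : Int) (k : Nat) (acc : List Int), row_num - pos ≤ (fuel : Int) →
      (pvARun row_num rows_in_block (pos + 1) (0, pvRot k ae, acc)).2.2 =
        pvAltLoop row_num rows_in_block ae fuel pos k acc := by
  intro fuel
  induction fuel with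
  | zero =>
    intro pos k acc hf
    obtain ⟨h, t, hht⟩ := List.exists_cons_of_ne_nil (pvRot_ne_nil k ae hne)
    rw [hht]
    rw [pv_chunk row_num rows_in_block (row_num + 1 - (pos + 1)).toNat (pos + 1) 0 h t acc rfl]
    rw [if_neg (by omega)]
    rfl
  | succ fuel ih =>
    intro pos k acc hf
    obtain ⟨h, t, hht⟩ := List.exists_cons_of_ne_nil (pvRot_ne_nil k ae hne)
    have hh : h = ae.getD (k % ae.length) 0 := by
      have := pvRot_head k ae hne
      rw [hht] at this
      simpa using this
    rw [hht]
    rw [pv_chunk row_num rows_in_block (row_num + 1 - (pos + 1)).toNat (pos + 1) 0 h t acc rfl]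
    rw [pvAltLoop]
    simp only [← hh]
    by_cases hc : h ≤ 0 ∨ row_num < pos + h
    · rw [if_neg (by omega), if_pos hc]
    · push_neg at hc
      rw [if_pos (by omega), if_neg (by omega)]
      have hrot : t ++ [h] = pvRot (k + 1) ae := by
        have := pvRot_tail_append k ae hne
        rw [hht, ← hh] at this
        simpa using this
      have harg : pos + 1 + (h - 0) = pos + h + 1 := by ring
      rw [harg]
      rw [show pos + h + 1 - 1 = pos + h from by ring]
      rw [hrot]
      exact ih (pos + h) (k + 1) (acc ++ [pvEmit (pos + h) rows_in_block]) (by omega)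

-- ===== VERDICT (by name: the statement is the Claim_ definition above) =====
theorem calculate_nums_in_block_spec : Claim_equal_calculate_nums_in_block := by
  intro row_num rows_in_block adding_each results_num starting_from _ hpre
  unfold Spec_calculate_nums_in_block
  unfold calculate_nums_in_block calculate_nums_in_block_alt
  rcases adding_each with _ | ⟨h, t⟩
  · have hr : row_num < pvStart starting_from := hpre.1 rfl
    rw [pvARun, PySem.List.pyRange_one_eq_nil (by omega)]
    simp
  · have hne : (h :: t) ≠ [] := by simp
    have hres : (pvARun row_num rows_in_block (pvStart starting_from) (0, h :: t, [])).2.2 =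
        pvAltLoop row_num rows_in_block (h :: t)
          (row_num + 1 - pvStart starting_from).toNat (pvStart starting_from - 1) 0 [] := by
      have h0 : pvRot 0 (h :: t) = h :: t := by simp [pvRot]
      have := pv_main row_num rows_in_block (h :: t) hne
        (row_num + 1 - pvStart starting_from).toNat (pvStart starting_from - 1) 0 []
        (by have := Int.self_le_toNat (row_num + 1 - pvStart starting_from); omega)
      rw [h0] at this
      have harg : pvStart starting_from - 1 + 1 = pvStart starting_from := by ring
      rw [harg] at this
      exact this
    simp only [List.isEmpty_cons, hres]
    rfl
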